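-- pv_equiv track=rewrite | github.com/TTG3333/aoc | 2021/Day 3/Part 2.py | returnNums
-- ===== SOURCE A (Python) =====
-- def returnNums(nums, bit, comp):
--     sortedNums = [[], []]
--     for x in nums:
--         if x[bit] == "0":
--             sortedNums[0].append(x)
--         else:
--             sortedNums[1].append(x)
--     if comp:
--         return sortedNums[0] if len(sortedNums[0]) > len(sortedNums[1]) else sortedNums[1]
--     else:
--         return sortedNums[1] if len(sortedNums[0]) > len(sortedNums[1]) else sortedNums[0]
-- ===== SOURCE B (Python) =====
-- def returnNums(nums, bit, comp):
--     zeros = sum(1 for x in nums if x[bit] == "0")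
--     pickZero = (zeros > len(nums) - zeros) == bool(comp)
--     return [x for x in nums if (x[bit] == "0") == pickZero]
-- ===== Notes on version B (the rewrite author's own statement) =====
-- stated objective: alternative
-- what changed: Replaces the two parallel accumulated group lists with a single counting pass that picks the target bit group, followed by one filtering pass.
import Mathlib
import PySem

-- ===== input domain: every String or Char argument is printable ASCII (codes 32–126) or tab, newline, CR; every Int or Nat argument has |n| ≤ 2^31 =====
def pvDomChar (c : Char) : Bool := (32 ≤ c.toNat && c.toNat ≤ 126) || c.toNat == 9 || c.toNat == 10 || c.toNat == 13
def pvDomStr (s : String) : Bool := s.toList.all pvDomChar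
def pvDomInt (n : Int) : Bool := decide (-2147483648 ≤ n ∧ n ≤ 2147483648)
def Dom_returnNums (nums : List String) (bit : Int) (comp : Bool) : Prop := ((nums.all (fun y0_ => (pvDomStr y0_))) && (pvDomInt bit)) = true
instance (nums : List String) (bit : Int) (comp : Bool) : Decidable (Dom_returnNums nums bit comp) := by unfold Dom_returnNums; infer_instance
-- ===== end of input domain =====

-- B replaces A's two accumulated group lists by a count-then-filter pass; same return value on Pre_.

-- ===== PORT A =====
def returnNums (nums : List String) (bit : Int) (comp : Bool) : List String :=
  -- sortedNums = [[], []]; for x in nums: append to group 0 or 1 by x[bit] == "0"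
  let sortedNums := nums.foldl
    (fun (s : List String × List String) x =>
      if PySem.Str.pyGet? x bit = some '0' then (s.1 ++ [x], s.2) else (s.1, s.2 ++ [x]))
    ([], [])
  if comp then
    (if sortedNums.1.length > sortedNums.2.length then sortedNums.1 else sortedNums.2)
  else
    (if sortedNums.1.length > sortedNums.2.length then sortedNums.2 else sortedNums.1)

-- ===== PORT B =====
def returnNums_alt (nums : List String) (bit : Int) (comp : Bool) : List String :=
  -- zeros = sum(1 for x in nums if x[bit] == "0")
  let zeros : Int := nums.foldl (fun acc x => if PySem.Str.pyGet? x bit = some '0' then acc + 1 else acc) 0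
  -- pickZero = (zeros > len(nums) - zeros) == bool(comp)
  let pickZero : Bool := (decide (zeros > (nums.length : Int) - zeros)) == comp
  -- [x for x in nums if (x[bit] == "0") == pickZero]
  nums.filter (fun x => (decide (PySem.Str.pyGet? x bit = some '0')) == pickZero)

-- ===== PRECONDITION & SPEC =====
-- Pre_ excludes exactly the inputs where some x[bit] is out of range, on which A raises IndexError.
def Pre_returnNums (nums : List String) (bit : Int) (comp : Bool) : Prop :=
  ∀ x ∈ nums, PySem.Raise.InRange x.toList.length bit
instance (nums : List String) (bit : Int) (comp : Bool) : Decidable (Pre_returnNums nums bit comp) := by unfold Pre_returnNums; infer_instance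
def pvWitness_returnNums : List String × Int × Bool := (["010", "110", "000"], 1, true)

def Spec_returnNums (nums : List String) (bit : Int) (comp : Bool) (out : List String) : Prop := out = returnNums_alt nums bit comp
instance (nums : List String) (bit : Int) (comp : Bool) (out : List String) : Decidable (Spec_returnNums nums bit comp out) := by unfold Spec_returnNums; infer_instance

-- ===== CLAIM (what is proved, stated in full; the proofs are below) =====
def Claim_equal_returnNums : Prop := ∀ (nums : List String) (bit : Int) (comp : Bool), Dom_returnNums nums bit comp → Pre_returnNums nums bit comp → Spec_returnNums nums bit comp (returnNums nums bit comp)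

-- ===== LEMMAS AND PROOFS =====

theorem pv_fold_partition (p : String → Bool) (nums : List String) (a b : List String) :
    nums.foldl (fun (s : List String × List String) x =>
        if p x then (s.1 ++ [x], s.2) else (s.1, s.2 ++ [x])) (a, b)
      = (a ++ nums.filter p, b ++ nums.filter (fun x => !p x)) := by
  induction nums generalizing a b with
  | nil => simp
  | cons h t ih =>
    by_cases hp : p h <;> simp [hp, ih]

theorem pv_fold_count (p : String → Bool) (nums : List String) (c : Int) :
    nums.foldl (fun (acc : Int) x => if p x then acc + 1 else acc) c
      = c + ((nums.filter p).length : Int) := by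
  induction nums generalizing c with
  | nil => simp
  | cons h t ih =>
    by_cases hp : p h <;> simp [hp, ih] <;> ring

theorem pv_filter_lengths (p : String → Bool) (nums : List String) :
    (nums.filter p).length + (nums.filter (fun x => !p x)).length = nums.length := by
  induction nums with
  | nil => simp
  | cons h t ih =>
    by_cases hp : p h <;> simp [hp] <;> omega

-- ===== VERDICT (by name: the statement is the Claim_ definition above) =====
theorem returnNums_spec : Claim_equal_returnNums := by
  intro nums bit comp _ _
  unfold Spec_returnNums returnNums returnNums_alt
  set p : String → Bool := fun x => decide (PySem.List.pyGet? x.toList bit = some '0') with hp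
  have hpart := pv_fold_partition p nums [] []
  have hcount := pv_fold_count p nums 0
  have hlen := pv_filter_lengths p nums
  simp only [decide_eq_true_eq] at hpart hcount ⊢
  rw [show (fun (s : List String × List String) x =>
        if PySem.Str.pyGet? x bit = some '0' then (s.1 ++ [x], s.2) else (s.1, s.2 ++ [x]))
      = (fun (s : List String × List String) x =>
        if p x then (s.1 ++ [x], s.2) else (s.1, s.2 ++ [x])) from by
        funext s x; simp [hp, PySem.Str.pyGet?]]
  rw [show (fun (acc : Int) x => if PySem.Str.pyGet? x bit = some '0' then acc + 1 else acc)
      = (fun (acc : Int) x => if p x then acc + 1 else acc) from by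
        funext acc x; simp [hp, PySem.Str.pyGet?]]
  rw [hpart, hcount]
  simp only [List.nil_append, Int.zero_add]
  have hfT : nums.filter (fun x => (decide (PySem.List.pyGet? x.toList bit = some '0')) == true)
      = nums.filter p := by
    apply List.filter_congr; intro x _; simp [hp]
  have hfF : nums.filter (fun x => (decide (PySem.List.pyGet? x.toList bit = some '0')) == false)
      = nums.filter (fun x => !p x) := by
    apply List.filter_congr; intro x _; simp [hp]
  have hgt : (((nums.filter p).length : Int) > (nums.length : Int) - ((nums.filter p).length : Int))
      ↔ (nums.filter p).length > (nums.filter (fun x => !p x)).length := by omega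
  by_cases hc : (nums.filter p).length > (nums.filter (fun x => !p x)).length
  · have h2 : (((nums.filter p).length : Int) > (nums.length : Int) - ((nums.filter p).length : Int)) := hgt.mpr hc
    cases comp <;> simp [h2, PySem.Str.pyGet?, hfT, hfF, ← hp] <;> simp [hc] <;> simp [hp] <;> rfl
  · have h2 : ¬ (((nums.filter p).length : Int) > (nums.length : Int) - ((nums.filter p).length : Int)) :=
      fun h => hc (hgt.mp h)
    cases comp <;> simp [h2, PySem.Str.pyGet?, hfT, hfF, ← hp] <;> simp [hc] <;> simp [hp] <;> rfl
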